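-- pv_equiv track=rewrite | github.com/mohanvamsisajaj21/One-Time-Pad-Scheme-using-Chaos-Equations-to-generate-key | GUI Interface.py | charToNum
-- ===== SOURCE A (Python) =====
-- def charToNum(char):
--     alphabet = "abcdefghijklmnopqrstuvwxyz"
--     num = 0
--     for letter in alphabet:
--         if letter == char:
--             break
--         else:
--             num+=1
--     return num
-- ===== SOURCE B (Python) =====
-- def charToNum(char):
--     if isinstance(char, str) and len(char) == 1 and 'a' <= char <= 'z':
--         return ord(char) - ord('a')
--     return 26
-- ===== Notes on version B (the rewrite author's own statement) =====
-- stated objective: idiomatic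
-- what changed: Replaced the linear scan over the alphabet string with a constant-time guard (single lowercase letter) plus closed-form ordinal arithmetic via ord, returning 26 otherwise; no loop or accumulator remains.
import Mathlib
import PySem

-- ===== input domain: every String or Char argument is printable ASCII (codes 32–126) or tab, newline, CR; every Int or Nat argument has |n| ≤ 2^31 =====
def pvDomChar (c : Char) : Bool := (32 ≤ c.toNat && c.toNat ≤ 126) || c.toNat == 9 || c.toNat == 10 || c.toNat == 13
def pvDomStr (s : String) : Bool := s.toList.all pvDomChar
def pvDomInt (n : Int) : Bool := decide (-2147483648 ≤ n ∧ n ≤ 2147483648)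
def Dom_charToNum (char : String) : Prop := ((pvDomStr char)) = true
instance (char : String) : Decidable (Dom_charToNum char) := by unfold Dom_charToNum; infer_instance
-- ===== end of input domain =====

-- B replaces A's scan of the alphabet with a closed-form ordinal computation (idiomatic; same behaviour).

-- ===== PORT A =====
-- A's for-loop with break over the alphabet string; each letter is a 1-char string compared to char
def charToNumLoop : List Char → Int → String → Int
  | [], num, _ => num
  | l :: ls, num, ch => if String.ofList [l] = ch then num else charToNumLoop ls (num + 1) ch

def charToNum (char : String) : Int :=
  charToNumLoop "abcdefghijklmnopqrstuvwxyz".toList 0 char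

-- ===== PORT B =====
def charToNum_alt (char : String) : Int :=
  match char.toList with
  | [c] => if 'a' ≤ c ∧ c ≤ 'z' then (c.toNat : Int) - 97 else 26
  | _ => 26

-- ===== PRECONDITION & SPEC =====
def Spec_charToNum (char : String) (out : Int) : Prop := out = charToNum_alt char
instance (char : String) (out : Int) : Decidable (Spec_charToNum char out) := by unfold Spec_charToNum; infer_instance

-- ===== CLAIM (what is proved, stated in full; the proofs are below) =====
def Claim_equal_charToNum : Prop := ∀ (char : String), Dom_charToNum char → Spec_charToNum char (charToNum char)

-- ===== LEMMAS AND PROOFS =====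

theorem ofList_singleton_eq_iff (l : Char) (ch : String) :
    (String.ofList [l] = ch) ↔ ch.toList = [l] := by
  constructor
  · intro h; rw [← h]; exact String.toList_ofList
  · intro h
    rw [show ch = String.ofList ch.toList from String.ofList_toList.symm, h]

theorem char_eq_iff_toNat (a b : Char) : a = b ↔ a.toNat = b.toNat := by
  constructor
  · intro h; rw [h]
  · intro h; exact Char.ext (UInt32.toNat_inj.mp h)

-- the loop returns num + length when char matches no letter (char is not a 1-char string of the list)
theorem loop_nonmatch (L : List Char) (num : Int) (ch : String)
    (hch : ∀ l : Char, ch.toList ≠ [l]) :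
    charToNumLoop L num ch = num + L.length := by
  induction L generalizing num with
  | nil => simp [charToNumLoop]
  | cons l ls ih =>
    rw [charToNumLoop, if_neg (fun h => hch l ((ofList_singleton_eq_iff l ch).mp h)), ih]
    simp only [List.length_cons]; push_cast; ring

-- the loop over a block of consecutive characters starting at code k, on a 1-char string
theorem loop_single (L : List Char) (k : Nat)
    (hL : ∀ i (_ : i < L.length), (L[i]).toNat = k + i) (c : Char) (num : Int) :
    charToNumLoop L num (String.ofList [c]) =
      if k ≤ c.toNat ∧ c.toNat < k + L.length then num + ((c.toNat : Int) - k)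
      else num + L.length := by
  induction L generalizing k num with
  | nil => simp [charToNumLoop]
  | cons l ls ih =>
    have hl : l.toNat = k := by simpa using hL 0 (by simp)
    rw [charToNumLoop]
    by_cases hc : l = c
    · rw [if_pos (by rw [hc])]
      have : c.toNat = k := by rw [← hc, hl]
      rw [if_pos (by simp only [List.length_cons]; omega)]
      rw [this]; ring
    · rw [if_neg (fun h => hc (by
        have := (ofList_singleton_eq_iff l (String.ofList [c])).mp h
        rw [String.toList_ofList] at this
        exact (List.cons.injEq _ _ _ _ ▸ this).1.symm))]
      have hne : c.toNat ≠ k := fun h => hc (char_eq_iff_toNat l c |>.mpr (by omega))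
      rw [ih (k + 1) (fun i hi => by simpa [Nat.add_assoc, Nat.add_comm 1 i] using hL (i + 1) (by simpa using hi))]
      simp only [List.length_cons]
      split_ifs <;> push_cast <;> omega

theorem alph_consec :
    ∀ i (_ : i < ("abcdefghijklmnopqrstuvwxyz".toList).length),
      (("abcdefghijklmnopqrstuvwxyz".toList)[i]).toNat = 97 + i := by decide

-- ===== VERDICT (by name: the statement is the Claim_ definition above) =====
theorem charToNum_spec : Claim_equal_charToNum := by
  intro ch _
  unfold Spec_charToNum charToNum
  cases h : ch.toList with
  | nil =>
    rw [loop_nonmatch _ _ _ (by simp [h]), show charToNum_alt ch = 26 by simp [charToNum_alt, h]]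
    simp
  | cons c rest =>
    cases rest with
    | cons d ds =>
      rw [loop_nonmatch _ _ _ (by simp [h]), show charToNum_alt ch = 26 by simp [charToNum_alt, h]]
      simp
    | nil =>
      have hch : ch = String.ofList [c] := by
        rw [show ch = String.ofList ch.toList from String.ofList_toList.symm, h]
      rw [hch, loop_single _ 97 alph_consec c 0,
        show charToNum_alt (String.ofList [c]) =
          if 'a' ≤ c ∧ c ≤ 'z' then (c.toNat : Int) - 97 else 26 by
            simp [charToNum_alt]]
      have hlen : ("abcdefghijklmnopqrstuvwxyz".toList).length = 26 := rfl
      rw [hlen]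
      have hiff : ('a' ≤ c ∧ c ≤ 'z') ↔ (97 ≤ c.toNat ∧ c.toNat < 97 + 26) := by
        constructor
        · intro ⟨h1, h2⟩
          exact ⟨h1, by have : c.toNat ≤ 122 := h2; omega⟩
        · intro ⟨h1, h2⟩
          exact ⟨h1, show c.toNat ≤ 122 by omega⟩
      by_cases hc : 97 ≤ c.toNat ∧ c.toNat < 97 + 26
      · rw [if_pos hc, if_pos (hiff.mpr hc)]; push_cast; ring
      · rw [if_neg hc, if_neg (fun hk => hc (hiff.mp hk))]; norm_num
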